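-- pv_equiv track=rewrite | github.com/NiKu-24/CS50P_Final-Project | project.py | divide_binary
-- ===== SOURCE A (Python) =====
-- def divide_binary(a, b, precision=10):
--     a = str(a).strip()
--     b = str(b).strip()
--     if not a or not b or not set(a).issubset({'0', '1'}) or not set(b).issubset({'0', '1'}):
--         raise ValueError("Use only 0 and 1 in both binary numbers.")
--     if int(b, 2) == 0:
--         return "Error: You can't divide by zero."
--
--     dividend = int(a, 2)
--     divisor = int(b, 2)
--
--     # Integer part
--     integer_part = dividend // divisor
--     remainder = dividend % divisor
--
--     result = bin(integer_part)[2:] + '.'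
--
--     # Fractional part
--     for _ in range(precision):
--         remainder *= 2
--         bit = remainder // divisor
--         result += str(bit)
--         remainder %= divisor
--         if remainder == 0:
--             break
--
--     return result
-- ===== SOURCE B (Python) =====
-- def divide_binary(a, b, precision=10):
--     a = str(a).strip()
--     b = str(b).strip()
--     if not a or not b or not set(a).issubset({'0', '1'}) or not set(b).issubset({'0', '1'}):
--         raise ValueError("Use only 0 and 1 in both binary numbers.")
--     divisor = int(b, 2)
--     if divisor == 0:
--         return "Error: You can't divide by zero."
--     dividend = int(a, 2)
--     integer_part, remainder = divmod(dividend, divisor)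
--     p = precision if precision > 0 else 0
--     if p == 0:
--         return format(integer_part, 'b') + '.'
--     # one bulk division instead of a per-bit loop
--     shifted = remainder << p
--     frac, rem = divmod(shifted, divisor)
--     bits = format(frac, 'b').zfill(p)
--     if rem == 0:
--         # the expansion terminated within p bits: A's loop stopped early,
--         # leaving no trailing zeros (but always at least one digit)
--         bits = bits.rstrip('0') or '0'
--     return format(integer_part, 'b') + '.' + bits
-- ===== Notes on version B (the rewrite author's own statement) =====
-- stated objective: alternative
-- what changed: The per-bit fractional loop (double the remainder, emit one quotient bit, break on zero) is replaced by a single bulk big-integer division (remainder << precision) // divisor rendered as a precision-wide zero-padded bit string, with trailing zeros stripped (keeping one digit) exactly when the division terminates.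
import Mathlib
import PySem

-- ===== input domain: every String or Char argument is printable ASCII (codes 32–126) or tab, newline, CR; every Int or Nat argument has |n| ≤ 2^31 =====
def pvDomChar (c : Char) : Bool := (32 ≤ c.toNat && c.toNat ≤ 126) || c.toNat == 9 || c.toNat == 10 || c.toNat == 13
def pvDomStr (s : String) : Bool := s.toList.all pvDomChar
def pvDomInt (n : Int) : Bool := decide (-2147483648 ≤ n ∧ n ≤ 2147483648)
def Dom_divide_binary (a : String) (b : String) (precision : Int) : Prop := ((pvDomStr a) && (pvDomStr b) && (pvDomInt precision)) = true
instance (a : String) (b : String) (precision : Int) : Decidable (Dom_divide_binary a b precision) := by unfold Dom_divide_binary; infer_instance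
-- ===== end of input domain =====

-- B replaces A's per-bit fractional loop by one bulk shift-and-divide plus a zero-strip;
-- equivalence of the RETURN value is proved on inputs where A does not raise ValueError.

-- ===== PORT A =====

-- int(s, 2) on a validated string of '0'/'1' characters (exact there)
def pvParseBin (cs : List Char) : Nat :=
  cs.foldl (fun n c => 2 * n + (if c = '1' then 1 else 0)) 0

-- A's fractional loop: 'for _ in range(precision)' with the early break; fuel = number of
-- iterations. Nat '/' and '%' are exact for Python '//' and '%' here (operands ≥ 0, divisor > 0).
def pvFracA (d : Nat) : Nat → Nat → List Char → List Char
  | 0, _, res => res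
  | k + 1, r, res =>
    let r2 := r * 2
    let bit := r2 / d
    let res2 := res ++ PySem.Int.toChars (bit : Int)      -- result += str(bit)
    let r3 := r2 % d
    if r3 = 0 then res2 else pvFracA d k r3 res2

def divide_binary (a : String) (b : String) (precision : Int) : String :=
  let la := (PySem.Str.strip a).toList
  let lb := (PySem.Str.strip b).toList
  -- set(x).issubset({'0','1'}) ported as an all-chars check (exact)
  if la.isEmpty || lb.isEmpty || !(la.all fun c => c == '0' || c == '1')
      || !(lb.all fun c => c == '0' || c == '1') then
    ""   -- Python raises ValueError here: excluded by Pre_divide_binary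
  else if pvParseBin lb = 0 then
    "Error: You can't divide by zero."
  else
    let dividend := pvParseBin la
    let divisor := pvParseBin lb
    let integer_part := dividend / divisor
    let remainder := dividend % divisor
    -- bin(integer_part)[2:] + '.'
    let res := PySem.List.slice (PySem.Int.toBinChars0b (integer_part : Int)) (some 2) none ++ ['.']
    String.ofList (pvFracA divisor precision.toNat remainder res)

-- ===== PORT B =====

-- s.rstrip('0') (exact)
def pvRstrip0 (cs : List Char) : List Char :=
  (cs.reverse.dropWhile (fun c => c == '0')).reverse

def divide_binary_alt (a : String) (b : String) (precision : Int) : String :=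
  let la := (PySem.Str.strip a).toList
  let lb := (PySem.Str.strip b).toList
  if la.isEmpty || lb.isEmpty || !(la.all fun c => c == '0' || c == '1')
      || !(lb.all fun c => c == '0' || c == '1') then
    ""   -- Python raises ValueError here: excluded by Pre_divide_binary
  else
    let divisor := pvParseBin lb
    if divisor = 0 then
      "Error: You can't divide by zero."
    else
      let dividend := pvParseBin la
      let integer_part := dividend / divisor
      let remainder := dividend % divisor
      let p : Nat := precision.toNat   -- p = precision if precision > 0 else 0
      if p = 0 then
        String.ofList (PySem.Int.toBinChars (integer_part : Int) ++ ['.'])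
      else
        let shifted := remainder * 2 ^ p          -- remainder << p (p ≥ 0: exact)
        let frac := shifted / divisor
        let rem := shifted % divisor
        let bits := PySem.Chars.zfill (PySem.Int.toBinChars (frac : Int)) (p : Int)
        let bits := if rem = 0 then (if pvRstrip0 bits = [] then ['0'] else pvRstrip0 bits)
                    else bits
        String.ofList (PySem.Int.toBinChars (integer_part : Int) ++ '.' :: bits)

-- ===== PRECONDITION & SPEC =====

-- Pre_ excludes exactly the inputs where A raises ValueError: a stripped argument that is
-- empty or contains a character other than '0'/'1'.
def Pre_divide_binary (a : String) (b : String) (precision : Int) : Prop :=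
  (PySem.Str.strip a).toList ≠ [] ∧ (PySem.Str.strip b).toList ≠ [] ∧
  ((PySem.Str.strip a).toList.all fun c => c == '0' || c == '1') = true ∧
  ((PySem.Str.strip b).toList.all fun c => c == '0' || c == '1') = true
instance (a : String) (b : String) (precision : Int) : Decidable (Pre_divide_binary a b precision) := by
  unfold Pre_divide_binary; infer_instance

def pvWitness_divide_binary : String × String × Int := ("101", "11", 4)

def Spec_divide_binary (a : String) (b : String) (precision : Int) (out : String) : Prop := out = divide_binary_alt a b precision
instance (a : String) (b : String) (precision : Int) (out : String) : Decidable (Spec_divide_binary a b precision out) := by unfold Spec_divide_binary; infer_instance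

-- ===== CLAIM (what is proved, stated in full; the proofs are below) =====
def Claim_equal_divide_binary : Prop := ∀ (a : String) (b : String) (precision : Int), Dom_divide_binary a b precision → Pre_divide_binary a b precision → Spec_divide_binary a b precision (divide_binary a b precision)

-- ===== LEMMAS AND PROOFS =====

-- format(n,'b') as a clean recursion: binary digits of n, MSB first, empty for 0
def pvGoBin (n : Nat) : List Char :=
  if h : n = 0 then [] else pvGoBin (n / 2) ++ [if n % 2 = 1 then '1' else '0']
decreasing_by exact Nat.div_lt_self (Nat.pos_of_ne_zero h) one_lt_two

def pvBinC (n : Nat) : List Char := if n = 0 then ['0'] else pvGoBin n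

-- the p low bits of q, MSB first (intended for q < 2^p)
def pvPbits : Nat → Nat → List Char
  | 0, _ => []
  | p + 1, q => (if 2 ^ p ≤ q then '1' else '0') :: pvPbits p (q % 2 ^ p)

-- A's emitted fraction bits, with and without the early break
def pvBitsBrk (d : Nat) : Nat → Nat → List Char
  | 0, _ => []
  | p + 1, r =>
    (if r * 2 / d = 1 then '1' else '0') ::
      (if r * 2 % d = 0 then [] else pvBitsBrk d p (r * 2 % d))

def pvBitsFull (d : Nat) : Nat → Nat → List Char
  | 0, _ => []
  | p + 1, r => (if r * 2 / d = 1 then '1' else '0') :: pvBitsFull d p (r * 2 % d)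

theorem toDigitsCore_two_eq (f : Nat) : ∀ (n : Nat) (l : List Char), n ≤ f →
    Nat.toDigitsCore 2 (f + 1) n l = (if n = 0 then ['0'] else pvGoBin n) ++ l := by
  induction f with
  | zero =>
    intro n l h
    interval_cases n
    simp [Nat.toDigitsCore, Nat.digitChar]
  | succ f ih =>
    intro n l h
    rcases Nat.eq_zero_or_pos n with h0 | h0
    · subst h0; simp [Nat.toDigitsCore, Nat.digitChar]
    rcases Nat.lt_or_ge n 2 with h1 | h2
    · have : n = 1 := by omega
      subst this
      simp [Nat.toDigitsCore, Nat.digitChar, pvGoBin]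
    · 
      have hdiv : n / 2 ≠ 0 := by omega
      have hdc : Nat.digitChar (n % 2) = if n % 2 = 1 then '1' else '0' := by
        rcases Nat.mod_two_eq_zero_or_one n with h | h <;> simp [h, Nat.digitChar]
      show Nat.toDigitsCore 2 (f + 1 + 1) n l = _
      rw [Nat.toDigitsCore]
      simp only [hdiv, if_false]
      rw [ih (n / 2) _ (by omega)]
      simp only [hdiv, if_false]
      conv_rhs => rw [pvGoBin]
      simp [h0.ne', hdc]

theorem toDigits_two_eq (n : Nat) : Nat.toDigits 2 n = pvBinC n := by
  have := toDigitsCore_two_eq n n [] le_rfl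
  simpa [Nat.toDigits, pvBinC] using this

theorem toBinChars_natCast (n : Nat) : PySem.Int.toBinChars (n : Int) = pvBinC n := by
  simp [PySem.Int.toBinChars, toDigits_two_eq]

theorem slice_toBinChars0b (n : Nat) :
    PySem.List.slice (PySem.Int.toBinChars0b (n : Int)) (some 2) none
      = PySem.Int.toBinChars (n : Int) := by
  have h := PySem.List.slice_from (xs := PySem.Int.toBinChars0b (n:Int)) (a := 2) (by norm_num)
  rw [h]
  simp [PySem.Int.toBinChars0b, PySem.Int.toBinChars,
    show ¬((n:Int) < 0) from by exact Int.not_lt.2 (Int.natCast_nonneg n)]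

theorem mem_pvGoBin : ∀ n : Nat, ∀ c ∈ pvGoBin n, c = '0' ∨ c = '1' := by
  intro n
  induction n using Nat.strong_induction_on with
  | _ n ih =>
    intro c hc
    rw [pvGoBin] at hc
    split at hc
    · simp at hc
    · rename_i hn
      rcases List.mem_append.1 hc with h | h
      · exact ih (n / 2) (Nat.div_lt_self (Nat.pos_of_ne_zero hn) one_lt_two) c h
      · simp at h; split at h <;> simp [h]

theorem zfill_no_sign (cs : List Char) (p : Nat) (h : ∀ c ∈ cs, c ≠ '+' ∧ c ≠ '-') :
    PySem.Chars.zfill cs (p : Int) = List.replicate (p - cs.length) '0' ++ cs := by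
  unfold PySem.Chars.zfill
  split
  · rename_i hle
    have hple : p ≤ cs.length := by exact_mod_cast hle
    simp [Nat.sub_eq_zero_of_le hple]
  · rename_i hgt
    match cs, h with
    | [], _ => simp
    | c :: rest, h =>
      have hc := h c (by simp)
      have hno : ¬(c = '+' ∨ c = '-') := by tauto
      simp only [hno, if_false]
      simp

theorem dropWhile_zeros (x : List Char) :
    ∀ n, List.dropWhile (fun c => c == '0') (List.replicate n '0' ++ x)
      = List.dropWhile (fun c => c == '0') x := by
  intro n
  induction n with
  | zero => simp
  | succ n ih => simp [List.replicate_succ, List.dropWhile, ih]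

theorem pvRstrip0_append_zeros (l : List Char) (n : Nat) :
    pvRstrip0 (l ++ List.replicate n '0') = pvRstrip0 l := by
  unfold pvRstrip0
  rw [List.reverse_append, List.reverse_replicate, dropWhile_zeros]

theorem pvRstrip0_eq_nil_iff (l : List Char) : pvRstrip0 l = [] ↔ ∀ c ∈ l, c = '0' := by
  unfold pvRstrip0
  rw [List.reverse_eq_nil_iff, List.dropWhile_eq_nil_iff]
  constructor
  · intro h c hc; simpa using h c (by simpa using hc)
  · intro h c hc; simpa using h c (by simpa using hc)

theorem pvRstrip0_cons (c : Char) (l : List Char) (h : pvRstrip0 l ≠ []) :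
    pvRstrip0 (c :: l) = c :: pvRstrip0 l := by
  unfold pvRstrip0 at *
  rw [List.reverse_cons, List.dropWhile_append]
  have hne : ¬(List.dropWhile (fun c => c == '0') l.reverse).isEmpty := by
    simpa [List.isEmpty_iff] using h
  simp only [hne, if_false]
  simp

theorem shift_mod (d r p : Nat) :
    r * 2 ^ (p + 1) % d = (r * 2 % d) * 2 ^ p % d := by
  have h : r * 2 ^ (p + 1) = (r * 2 % d) * 2 ^ p + d * ((r * 2 / d) * 2 ^ p) := by
    conv_lhs => rw [show r * 2 ^ (p+1) = (r * 2) * 2 ^ p by ring, ← Nat.div_add_mod (r * 2) d]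
    ring
  rw [h, Nat.add_mul_mod_self_left]

theorem shift_div (d r p : Nat) (hd : 0 < d) :
    r * 2 ^ (p + 1) / d = (r * 2 / d) * 2 ^ p + (r * 2 % d) * 2 ^ p / d := by
  have h : r * 2 ^ (p + 1) = d * ((r * 2 / d) * 2 ^ p) + (r * 2 % d) * 2 ^ p := by
    conv_lhs => rw [show r * 2 ^ (p+1) = (r * 2) * 2 ^ p by ring, ← Nat.div_add_mod (r * 2) d]
    ring
  rw [h, Nat.mul_add_div hd]

theorem pvPbits_zero : ∀ p, pvPbits p 0 = List.replicate p '0' := by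
  intro p
  induction p with
  | zero => simp [pvPbits]
  | succ p ih => simp [pvPbits, Nat.not_le.2 (Nat.two_pow_pos p), ih, List.replicate_succ]

theorem pvBitsFull_zero (d : Nat) : ∀ p, pvBitsFull d p 0 = List.replicate p '0' := by
  intro p
  induction p with
  | zero => simp [pvBitsFull]
  | succ p ih => simp [pvBitsFull, Nat.zero_div, ih, List.replicate_succ]

theorem pvPbits_all_zero : ∀ p q, (∀ c ∈ pvPbits p q, c = '0') → q % 2 ^ p = 0 := by
  intro p
  induction p with
  | zero => intro q _; simp [Nat.mod_one]
  | succ p ih =>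
    intro q h
    by_cases hle : 2 ^ p ≤ q
    · have h1 := h '1' (by simp [pvPbits, hle])
      simp at h1
    · have htail := ih (q % 2 ^ p) (fun c hc => h c (by simp [pvPbits]; right; exact hc))
      have h1 : q % 2 ^ p = 0 := by simpa using htail
      have h2 : q % 2 ^ p = q := Nat.mod_eq_of_lt (Nat.lt_of_not_le hle)
      have hq : q = 0 := by omega
      simp [hq]

theorem fracA_eq (d : Nat) (hd : 0 < d) : ∀ (p r : Nat) (res : List Char), r < d →
    pvFracA d p r res = res ++ pvBitsBrk d p r := by
  intro p
  induction p with
  | zero => intro r res _; simp [pvFracA, pvBitsBrk]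
  | succ p ih =>
    intro r res hr
    have hbit : r * 2 / d = 0 ∨ r * 2 / d = 1 := by
      exact Nat.le_one_iff_eq_zero_or_eq_one.1
        (Nat.lt_succ_iff.1 ((Nat.div_lt_iff_lt_mul hd).2 (by omega)))
    have hchars : PySem.Int.toChars ((r * 2 / d : Nat) : Int)
        = [if r * 2 / d = 1 then '1' else '0'] := by
      rcases hbit with h | h <;> rw [h] <;> simp <;> decide
    show (if r * 2 % d = 0 then res ++ PySem.Int.toChars ((r * 2 / d : Nat) : Int)
          else pvFracA d p (r * 2 % d) (res ++ PySem.Int.toChars ((r * 2 / d : Nat) : Int))) = _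
    rw [hchars]
    by_cases h0 : r * 2 % d = 0
    · simp [pvBitsBrk, h0]
    · rw [if_neg h0, ih (r * 2 % d) _ (Nat.mod_lt _ hd)]
      simp [pvBitsBrk, h0]

theorem brk_eq_full (d : Nat) : ∀ p r, r * 2 ^ p % d ≠ 0 →
    pvBitsBrk d p r = pvBitsFull d p r := by
  intro p
  induction p with
  | zero => intro r _; rfl
  | succ p ih =>
    intro r hmod
    have hr' : r * 2 % d ≠ 0 := by
      intro h0
      apply hmod
      rw [shift_mod, h0, Nat.zero_mul, Nat.zero_mod]
    have hmod' : (r * 2 % d) * 2 ^ p % d ≠ 0 := by rw [← shift_mod]; exact hmod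
    simp [pvBitsBrk, pvBitsFull, hr', ih _ hmod']

theorem full_eq_pbits (d : Nat) (hd : 0 < d) : ∀ p r, r < d →
    pvBitsFull d p r = pvPbits p (r * 2 ^ p / d) := by
  intro p
  induction p with
  | zero => intro r _; rfl
  | succ p ih =>
    intro r hr
    have hbit : r * 2 / d = 0 ∨ r * 2 / d = 1 := by
      exact Nat.le_one_iff_eq_zero_or_eq_one.1
        (Nat.lt_succ_iff.1 ((Nat.div_lt_iff_lt_mul hd).2 (by omega)))
    have hq' : (r * 2 % d) * 2 ^ p / d < 2 ^ p := by
      refine (Nat.div_lt_iff_lt_mul hd).2 ?_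
      have h1 : r * 2 % d < d := Nat.mod_lt _ hd
      calc (r * 2 % d) * 2 ^ p < d * 2 ^ p := by
            exact (Nat.mul_lt_mul_right (Nat.two_pow_pos p)).2 h1
        _ = 2 ^ p * d := by ring
    rw [shift_div d r p hd]
    show (if r * 2 / d = 1 then '1' else '0') :: pvBitsFull d p (r * 2 % d) = _
    rw [ih (r * 2 % d) (Nat.mod_lt _ hd)]
    rcases hbit with h | h <;> rw [h]
    · simp [pvPbits, Nat.not_le.2 hq', Nat.mod_eq_of_lt hq']
    · simp [pvPbits, Nat.add_mod_left, Nat.mod_eq_of_lt hq']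

theorem brk_strip (d : Nat) (hd : 0 < d) : ∀ p r, r < d → r * 2 ^ (p + 1) % d = 0 →
    pvBitsBrk d (p + 1) r =
      (if pvRstrip0 (pvBitsFull d (p + 1) r) = [] then ['0']
       else pvRstrip0 (pvBitsFull d (p + 1) r)) := by
  intro p
  induction p with
  | zero =>
    intro r hr hmod
    have h0 : r * 2 % d = 0 := by simpa [pow_one] using hmod
    show (if r * 2 / d = 1 then '1' else '0') :: _ = _
    rw [show pvBitsFull d 1 r = [if r * 2 / d = 1 then '1' else '0'] by
      simp [pvBitsFull]]
    by_cases hb : r * 2 / d = 1 <;>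
      simp [pvBitsBrk, pvRstrip0, h0, hb]
  | succ p ih =>
    intro r hr hmod
    by_cases hr' : r * 2 % d = 0
    · have hfull : pvBitsFull d (p + 2) r
          = (if r * 2 / d = 1 then '1' else '0') :: List.replicate (p + 1) '0' := by
        show (if r * 2 / d = 1 then '1' else '0') :: pvBitsFull d (p+1) (r * 2 % d) = _
        rw [hr', pvBitsFull_zero]
      have hbrk : pvBitsBrk d (p + 2) r = [if r * 2 / d = 1 then '1' else '0'] := by
        simp [pvBitsBrk, hr']
      rw [hbrk, hfull,
        show ((if r * 2 / d = 1 then '1' else '0') :: List.replicate (p + 1) '0')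
            = [if r * 2 / d = 1 then '1' else '0'] ++ List.replicate (p + 1) '0' by simp,
        pvRstrip0_append_zeros]
      by_cases hb : r * 2 / d = 1 <;> simp [pvRstrip0, hb]
    · have hmod' : (r * 2 % d) * 2 ^ (p + 1) % d = 0 := by rw [← shift_mod]; exact hmod
      have hrlt : r * 2 % d < d := Nat.mod_lt _ hd
      have ihr := ih (r * 2 % d) hrlt hmod'
      -- the tail is nonempty after stripping: its value q' is ≥ 1
      have hq1 : 1 ≤ (r * 2 % d) * 2 ^ (p + 1) / d := by
        have hdvd : d ∣ (r * 2 % d) * 2 ^ (p + 1) := Nat.dvd_of_mod_eq_zero hmod'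
        have hpos : 0 < (r * 2 % d) * 2 ^ (p + 1) :=
          Nat.mul_pos (Nat.pos_of_ne_zero hr') (Nat.two_pow_pos _)
        exact (Nat.le_div_iff_mul_le hd).2 (by simpa using Nat.le_of_dvd hpos hdvd)
      have hqlt : (r * 2 % d) * 2 ^ (p + 1) / d < 2 ^ (p + 1) := by
        refine (Nat.div_lt_iff_lt_mul hd).2 ?_
        calc (r * 2 % d) * 2 ^ (p + 1) < d * 2 ^ (p + 1) :=
              (Nat.mul_lt_mul_right (Nat.two_pow_pos _)).2 hrlt
          _ = 2 ^ (p + 1) * d := by ring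
      have hne : pvRstrip0 (pvBitsFull d (p + 1) (r * 2 % d)) ≠ [] := by
        rw [full_eq_pbits d hd _ _ hrlt, Ne, pvRstrip0_eq_nil_iff]
        intro hall
        have := pvPbits_all_zero _ _ hall
        rw [Nat.mod_eq_of_lt hqlt] at this
        omega
      have hfull : pvBitsFull d (p + 2) r
          = (if r * 2 / d = 1 then '1' else '0') :: pvBitsFull d (p + 1) (r * 2 % d) := rfl
      have hbrk : pvBitsBrk d (p + 2) r
          = (if r * 2 / d = 1 then '1' else '0') :: pvBitsBrk d (p + 1) (r * 2 % d) := by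
        simp [pvBitsBrk, hr']
      rw [hbrk, ihr, hfull, pvRstrip0_cons _ _ hne]
      simp [hne]

theorem pbits_peel : ∀ p q, q < 2 ^ (p + 1) →
    pvPbits (p + 1) q = pvPbits p (q / 2) ++ [if q % 2 = 1 then '1' else '0'] := by
  intro p
  induction p with
  | zero =>
    intro q hq
    interval_cases q <;> simp [pvPbits]
  | succ p ih =>
    intro q hq
    have hmlt : q % 2 ^ (p + 1) < 2 ^ (p + 1) := Nat.mod_lt _ (Nat.two_pow_pos _)
    have e1 : q % 2 ^ (p + 1) / 2 = q / 2 % 2 ^ p := by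
      rw [show (2:Nat) ^ (p + 1) = 2 * 2 ^ p by ring]
      exact Nat.mod_mul_right_div_self q 2 (2 ^ p)
    have e2 : q % 2 ^ (p + 1) % 2 = q % 2 :=
      Nat.mod_mod_of_dvd q ⟨2 ^ p, by ring⟩
    have e3 : 2 ^ (p + 1) ≤ q ↔ 2 ^ p ≤ q / 2 := by
      rw [Nat.le_div_iff_mul_le (by norm_num : 0 < 2)]
      constructor <;> intro h
      · calc 2 ^ p * 2 = 2 ^ (p + 1) := by ring
          _ ≤ q := h
      · calc (2:Nat) ^ (p + 1) = 2 ^ p * 2 := by ring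
          _ ≤ q := h
    show (if 2 ^ (p + 1) ≤ q then '1' else '0') :: pvPbits (p + 1) (q % 2 ^ (p + 1))
        = (if 2 ^ p ≤ q / 2 then '1' else '0') :: pvPbits p (q / 2 % 2 ^ p) ++ _
    rw [ih _ hmlt, e1, e2]
    by_cases hb : 2 ^ (p + 1) ≤ q
    · simp [hb, e3.1 hb]
    · have hb' : ¬(2 ^ p ≤ q / 2) := fun h => hb (e3.2 h)
      simp [hb, hb']

theorem pad_binC_eq_pbits : ∀ p q, 1 ≤ p → q < 2 ^ p →
    List.replicate (p - (pvBinC q).length) '0' ++ pvBinC q = pvPbits p q := by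
  intro p
  induction p with
  | zero => intro q h; omega
  | succ p ih =>
    intro q _ hq
    match p, ih with
    | 0, _ =>
      interval_cases q
      · show List.replicate (1 - (pvBinC 0).length) '0' ++ pvBinC 0 = pvPbits 1 0
        simp [pvBinC, pvPbits]
      · rw [show pvBinC 1 = ['1'] by rw [pvBinC]; simp; rw [pvGoBin]; simp; rw [pvGoBin]; simp]
        simp [pvPbits]
    | p + 1, ih =>
      rw [pbits_peel _ _ hq]
      rcases Nat.lt_or_ge q 2 with h2 | h2
      · interval_cases q
        · rw [show pvBinC 0 = ['0'] from rfl]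
          simp [pvPbits_zero, List.replicate_succ']
        · rw [show pvBinC 1 = ['1'] by rw [pvBinC]; simp; rw [pvGoBin]; simp; rw [pvGoBin]; simp]
          show List.replicate (p + 2 - 1) '0' ++ ['1'] = pvPbits (p + 1) 0 ++ ['1']
          simp [pvPbits_zero, List.replicate_succ']
      · have hq0 : q ≠ 0 := by omega
        have hq2 : q / 2 ≠ 0 := by omega
        have hgo : pvBinC q = pvBinC (q / 2) ++ [if q % 2 = 1 then '1' else '0'] := by
          rw [pvBinC, if_neg hq0]
          rw [pvGoBin, dif_neg hq0, pvBinC, if_neg hq2]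
        have hlen : (pvBinC q).length = (pvBinC (q / 2)).length + 1 := by
          rw [hgo]; simp
        have hdivlt : q / 2 < 2 ^ (p + 1) := by
          rw [Nat.div_lt_iff_lt_mul (by norm_num : 0 < 2)]
          calc q < 2 ^ (p + 2) := hq
            _ = 2 ^ (p + 1) * 2 := by ring
        rw [hlen,
          show p + 2 - ((pvBinC (q / 2)).length + 1) = p + 1 - (pvBinC (q / 2)).length by omega,
          hgo, ← List.append_assoc, ih (q / 2) (by omega) hdivlt]

theorem pvBinC_chars (q : Nat) : ∀ c ∈ pvBinC q, c ≠ '+' ∧ c ≠ '-' := by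
  intro c hc
  unfold pvBinC at hc
  split at hc
  · simp at hc; simp [hc]
  · rcases mem_pvGoBin q c hc with h | h <;> simp [h]

theorem bits_main (d r p : Nat) (hd : 0 < d) (hr : r < d) (hp : 1 ≤ p) :
    pvBitsBrk d p r =
      (let bits := PySem.Chars.zfill (PySem.Int.toBinChars ((r * 2 ^ p / d : Nat) : Int)) (p : Int);
       if r * 2 ^ p % d = 0 then (if pvRstrip0 bits = [] then ['0'] else pvRstrip0 bits)
       else bits) := by
  have hqlt : r * 2 ^ p / d < 2 ^ p := by
    refine (Nat.div_lt_iff_lt_mul hd).2 ?_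
    calc r * 2 ^ p < d * 2 ^ p := (Nat.mul_lt_mul_right (Nat.two_pow_pos _)).2 hr
      _ = 2 ^ p * d := by ring
  have hbits : PySem.Chars.zfill (PySem.Int.toBinChars ((r * 2 ^ p / d : Nat) : Int)) (p : Int)
      = pvPbits p (r * 2 ^ p / d) := by
    rw [toBinChars_natCast, zfill_no_sign _ _ (pvBinC_chars _), pad_binC_eq_pbits p _ hp hqlt]
  simp only [hbits]
  by_cases hmod : r * 2 ^ p % d = 0
  · simp only [hmod, if_true, eq_self_iff_true]
    match p, hp with
    | p + 1, _ =>
      rw [brk_strip d hd p r hr hmod, full_eq_pbits d hd _ _ hr]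
  · simp only [hmod, if_false]
    rw [brk_eq_full d p r hmod, full_eq_pbits d hd _ _ hr]

-- ===== VERDICT (by name: the statement is the Claim_ definition above) =====
theorem divide_binary_spec : Claim_equal_divide_binary := by
  unfold Claim_equal_divide_binary
  intro a b precision _ hpre
  obtain ⟨ha, hb, hca, hcb⟩ := hpre
  unfold Spec_divide_binary divide_binary divide_binary_alt
  set la := (PySem.Str.strip a).toList with hla
  set lb := (PySem.Str.strip b).toList with hlb
  have hcond : (la.isEmpty || lb.isEmpty || !(la.all fun c => c == '0' || c == '1')
      || !(lb.all fun c => c == '0' || c == '1')) = false := by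
    simp only [Bool.or_eq_false_iff, Bool.not_eq_false']
    exact ⟨⟨⟨by simpa using ha, by simpa using hb⟩, hca⟩, hcb⟩
  simp only [hcond, Bool.false_eq_true, if_false]
  by_cases hz : pvParseBin lb = 0
  · simp only [hz, if_true, eq_self_iff_true]
  · simp only [hz, if_false]
    have hd : 0 < pvParseBin lb := Nat.pos_of_ne_zero hz
    have hrlt : pvParseBin la % pvParseBin lb < pvParseBin lb := Nat.mod_lt _ hd
    rw [fracA_eq _ hd _ _ _ hrlt, slice_toBinChars0b]
    by_cases hp0 : precision.toNat = 0
    · simp only [hp0, if_true, eq_self_iff_true, pvBitsBrk, List.append_nil]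
    · simp only [hp0, if_false]
      rw [bits_main _ _ _ hd hrlt (by omega)]
      simp only [List.append_assoc, List.singleton_append]
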